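-- pv_equiv track=rewrite | github.com/nnthony/RPA_calificaciones | eval/PC1/2/4.py | eliminar_mayor_menor_alt
-- ===== SOURCE A (Python) =====
-- def eliminar_mayor_menor_alt(num):
--     # Inicializamos variables
--     mayor = -1
--     menor = 10
--     resultado = 0
--     factor = 1
--     original = num
--
--     # Encontrar el mayor y menor dígito en una sola pasada
--     while num > 0:
--         digito = num % 10
--         if digito > mayor:
--             mayor = digito
--         if digito < menor:
--             menor = digito
--         num //= 10
--
--     # Resetear num para la segunda pasada
--     num = original
--
--     # Eliminar el mayor y menor dígito
--     while num > 0: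
--         digito = num % 10
--         # Si el dígito no es el mayor o menor, se agrega al resultado
--         if digito != mayor and digito != menor:
--             resultado = resultado + digito * factor
--             factor *= 10
--         num //= 10
--
--     return resultado
-- ===== SOURCE B (Python) =====
-- def eliminar_mayor_menor_alt(num):
--     # B: collect the distinct digits into a set (one pass), take hi/lo with
--     # built-in max/min, then DELETE the extreme digits from the number itself
--     # by arithmetic splicing (num = upper*p + lower) instead of A's rebuild
--     # of a fresh accumulator with a factor multiplier.
--     if num <= 0:
--         return 0
--     present = set()
--     n = num
--     while n > 0:
--         present.add(n % 10)
--         n //= 10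
--     hi, lo = max(present), min(present)
--     n, p = num, 1
--     while n >= p:
--         d = (n // p) % 10
--         if d == hi or d == lo:
--             n = n // (p * 10) * p + n % p
--         else:
--             p *= 10
--     return n
-- ===== Notes on version B (the rewrite author's own statement) =====
-- stated objective: alternative
-- what changed: B collects the distinct digits into a set, takes extrema with built-in max/min, and then deletes the extreme digits from the number itself by arithmetic splicing (n = n//(p*10)*p + n%p at a moving position p), instead of A's two running-extrema modular passes that rebuild a fresh result with a factor accumulator.
import Mathlib
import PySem

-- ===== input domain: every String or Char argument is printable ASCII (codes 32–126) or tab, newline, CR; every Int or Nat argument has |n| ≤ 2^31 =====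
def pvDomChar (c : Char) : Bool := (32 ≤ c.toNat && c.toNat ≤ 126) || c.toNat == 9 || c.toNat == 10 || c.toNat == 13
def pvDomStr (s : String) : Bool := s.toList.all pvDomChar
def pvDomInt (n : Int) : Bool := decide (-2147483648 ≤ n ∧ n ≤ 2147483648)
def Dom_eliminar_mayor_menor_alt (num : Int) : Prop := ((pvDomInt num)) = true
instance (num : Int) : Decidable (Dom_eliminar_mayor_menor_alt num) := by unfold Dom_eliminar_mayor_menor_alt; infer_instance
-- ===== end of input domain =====

-- B gathers the distinct digits into a set, takes extrema with built-in max/min, and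
-- deletes the extreme digits from the number itself by arithmetic splicing, instead of
-- A's two running-extrema passes rebuilding a fresh accumulator; alternative structure, same cost.

-- termination helper used by the ports' recursions (num //= 10 with num > 0)
theorem pvFloordiv10_lt (num : Int) (h : 0 < num) :
    (PySem.Int.floordiv num 10).toNat < num.toNat := by
  have h1 : PySem.Int.floordiv num 10 < num :=
    (PySem.Int.floordiv_lt_iff_lt_mul (by omega)).2 (by omega)
  have h2 : (0:Int) ≤ PySem.Int.floordiv num 10 :=
    (PySem.Int.le_floordiv_iff_mul_le (by omega)).2 (by omega)
  omega

-- ===== PORT A =====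
-- first while loop: running max/min over the digits
def pvALoop1 (num mayor menor : Int) : Int × Int :=
  if h : 0 < num then
    let digito := PySem.Int.mod num 10
    pvALoop1 (PySem.Int.floordiv num 10)
      (if digito > mayor then digito else mayor)
      (if digito < menor then digito else menor)
  else (mayor, menor)
termination_by num.toNat
decreasing_by exact pvFloordiv10_lt num h

-- second while loop: accumulate kept digits LSB-first with a factor
def pvALoop2 (num mayor menor resultado factor : Int) : Int :=
  if h : 0 < num then
    let digito := PySem.Int.mod num 10
    if digito ≠ mayor ∧ digito ≠ menor then
      pvALoop2 (PySem.Int.floordiv num 10) mayor menor (resultado + digito * factor) (factor * 10)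
    else
      pvALoop2 (PySem.Int.floordiv num 10) mayor menor resultado factor
  else resultado
termination_by num.toNat
decreasing_by all_goals exact pvFloordiv10_lt num h

def eliminar_mayor_menor_alt (num : Int) : Int :=
  let mm := pvALoop1 num (-1) 10
  pvALoop2 num mm.1 mm.2 0 1

-- ===== PORT B =====
-- Source B's first while loop: present.add(n % 10); n //= 10
def pvBSetLoop (n : Int) (s : PySem.Set Int) : PySem.Set Int :=
  if h : 0 < n then
    pvBSetLoop (PySem.Int.floordiv n 10) (PySem.Set.add s (PySem.Int.mod n 10))
  else s
termination_by n.toNat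
decreasing_by exact pvFloordiv10_lt n h

-- termination helper for the splice loop: the digit count above position p shrinks
theorem pvBSplice_meas₁ (n p : Int) (hp : 0 < p) (hnp : p ≤ n) :
    (PySem.Int.floordiv (PySem.Int.floordiv n (p * 10) * p + PySem.Int.mod n p) p).toNat
      < (PySem.Int.floordiv n p).toNat := by
  have hq0 : (0:Int) ≤ PySem.Int.floordiv n (p * 10) :=
    (PySem.Int.le_floordiv_iff_mul_le (by omega)).2 (by omega)
  have hr0 : (0:Int) ≤ PySem.Int.mod n p := PySem.Int.mod_nonneg _ (by omega)
  have hr1 : PySem.Int.mod n p < p := PySem.Int.mod_lt _ (by omega)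
  have hnew : PySem.Int.floordiv (PySem.Int.floordiv n (p * 10) * p + PySem.Int.mod n p) p
      = PySem.Int.floordiv n (p * 10) :=
    (PySem.Int.floordiv_eq_iff_of_pos (by omega)).2 ⟨by omega, by nlinarith⟩
  have h1 : (1:Int) ≤ PySem.Int.floordiv n p :=
    (PySem.Int.le_floordiv_iff_mul_le (by omega)).2 (by omega)
  have hdd : PySem.Int.floordiv (PySem.Int.floordiv n p) 10 = PySem.Int.floordiv n (p * 10) := by
    rw [PySem.Int.floordiv_eq_ediv_of_pos (by omega : (0:Int) < p),
        PySem.Int.floordiv_eq_ediv_of_pos (by omega : (0:Int) < 10),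
        PySem.Int.floordiv_eq_ediv_of_pos (by omega : (0:Int) < p * 10)]
    exact Int.ediv_ediv_of_nonneg (by omega)
  have hlt : PySem.Int.floordiv (PySem.Int.floordiv n p) 10 < PySem.Int.floordiv n p :=
    (PySem.Int.floordiv_lt_iff_lt_mul (by omega)).2 (by omega)
  rw [hnew, ← hdd]
  omega

theorem pvBSplice_meas₂ (n p : Int) (hp : 0 < p) (hnp : p ≤ n) :
    (PySem.Int.floordiv n (p * 10)).toNat < (PySem.Int.floordiv n p).toNat := by
  have h1 : (1:Int) ≤ PySem.Int.floordiv n p :=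
    (PySem.Int.le_floordiv_iff_mul_le (by omega)).2 (by omega)
  have hq0 : (0:Int) ≤ PySem.Int.floordiv n (p * 10) :=
    (PySem.Int.le_floordiv_iff_mul_le (by omega)).2 (by omega)
  have hdd : PySem.Int.floordiv (PySem.Int.floordiv n p) 10 = PySem.Int.floordiv n (p * 10) := by
    rw [PySem.Int.floordiv_eq_ediv_of_pos (by omega : (0:Int) < p),
        PySem.Int.floordiv_eq_ediv_of_pos (by omega : (0:Int) < 10),
        PySem.Int.floordiv_eq_ediv_of_pos (by omega : (0:Int) < p * 10)]
    exact Int.ediv_ediv_of_nonneg (by omega)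
  have hlt : PySem.Int.floordiv (PySem.Int.floordiv n p) 10 < PySem.Int.floordiv n p :=
    (PySem.Int.floordiv_lt_iff_lt_mul (by omega)).2 (by omega)
  omega

-- Source B's second while loop: while n >= p: splice out the digit at position p or advance p.
-- The conjunct 0 < p only makes the recursion total; every call from the port has p = 1
-- and p is only ever multiplied by 10, so it is invariantly true in Source B.
def pvBSplice (hi lo n p : Int) : Int :=
  if h : 0 < p ∧ p ≤ n then
    let d := PySem.Int.mod (PySem.Int.floordiv n p) 10
    if d = hi ∨ d = lo then
      pvBSplice hi lo (PySem.Int.floordiv n (p * 10) * p + PySem.Int.mod n p) p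
    else
      pvBSplice hi lo n (p * 10)
  else n
termination_by (PySem.Int.floordiv n p).toNat
decreasing_by
  · exact pvBSplice_meas₁ n p h.1 h.2
  · exact pvBSplice_meas₂ n p h.1 h.2

def eliminar_mayor_menor_alt_alt (num : Int) : Int :=
  if num ≤ 0 then 0
  else
    let present := pvBSetLoop num PySem.Set.empty
    let hi := (PySem.List.max? present (fun x => x)).getD 0   -- max(present); present nonempty here
    let lo := (PySem.List.min? present (fun x => x)).getD 0   -- min(present)
    pvBSplice hi lo num 1

-- ===== PRECONDITION & SPEC =====
def Spec_eliminar_mayor_menor_alt (num : Int) (out : Int) : Prop := out = eliminar_mayor_menor_alt_alt num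
instance (num : Int) (out : Int) : Decidable (Spec_eliminar_mayor_menor_alt num out) := by unfold Spec_eliminar_mayor_menor_alt; infer_instance

-- ===== CLAIM (what is proved, stated in full; the proofs are below) =====
def Claim_equal_eliminar_mayor_menor_alt : Prop := ∀ (num : Int), Dom_eliminar_mayor_menor_alt num → Spec_eliminar_mayor_menor_alt num (eliminar_mayor_menor_alt num)

-- ===== LEMMAS AND PROOFS =====

-- LSB-first digit list of n (proof-side abstraction shared by both analyses)
def pvBDigits (num : Int) : List Int :=
  if h : 0 < num then
    PySem.Int.mod num 10 :: pvBDigits (PySem.Int.floordiv num 10)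
  else []
termination_by num.toNat
decreasing_by exact pvFloordiv10_lt num h

-- LSB-first value of a digit list
def pvVal : List Int → Int
  | [] => 0
  | d :: t => d + 10 * pvVal t

theorem pvBDigits_bounds (num : Int) : ∀ d ∈ pvBDigits num, 0 ≤ d ∧ d < 10 := by
  induction num using pvBDigits.induct with
  | case1 num h ih =>
    rw [pvBDigits, dif_pos h]
    intro d hd
    rcases List.mem_cons.1 hd with rfl | hd
    · exact ⟨PySem.Int.mod_nonneg _ (by omega), PySem.Int.mod_lt _ (by omega)⟩
    · exact ih d hd
  | case2 num h =>
    rw [pvBDigits, dif_neg h]; intro d hd; simp at hd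

theorem pvALoop1_eq (num : Int) : ∀ (mayor menor : Int),
    pvALoop1 num mayor menor =
      ((pvBDigits num).foldl (fun m d => if d > m then d else m) mayor,
       (pvBDigits num).foldl (fun m d => if d < m then d else m) menor) := by
  induction num using pvBDigits.induct with
  | case1 num h ih =>
    intro mayor menor
    rw [pvALoop1, dif_pos h, pvBDigits, dif_pos h, List.foldl_cons, List.foldl_cons, ih]
  | case2 num h =>
    intro mayor menor
    rw [pvALoop1, dif_neg h, pvBDigits, dif_neg h]; rfl

theorem pvALoop2_eq (num : Int) : ∀ (mayor menor resultado factor : Int),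
    pvALoop2 num mayor menor resultado factor =
      resultado + factor * pvVal ((pvBDigits num).filter (fun d => decide (d ≠ mayor ∧ d ≠ menor))) := by
  induction num using pvBDigits.induct with
  | case1 num h ih =>
    intro mayor menor resultado factor
    rw [pvALoop2, dif_pos h, pvBDigits, dif_pos h]
    by_cases hc : PySem.Int.mod num 10 ≠ mayor ∧ PySem.Int.mod num 10 ≠ menor
    · rw [if_pos hc, ih, List.filter_cons, if_pos (by simpa using hc), pvVal]; ring
    · rw [if_neg hc, ih, List.filter_cons, if_neg (by simpa using hc)]
  | case2 num h =>
    intro mayor menor resultado factor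
    rw [pvALoop2, dif_neg h, pvBDigits, dif_neg h]
    simp [pvVal]

theorem pvIfMax (m d : Int) : (if d > m then d else m) = max m d := by
  split <;> omega

theorem pvIfMin (m d : Int) : (if d < m then d else m) = min m d := by
  split <;> omega

-- the set loop is a fold of Set.add over the digit list
theorem pvBSetLoop_eq (n : Int) : ∀ (s : PySem.Set Int),
    pvBSetLoop n s = (pvBDigits n).foldl PySem.Set.add s := by
  induction n using pvBDigits.induct with
  | case1 n h ih =>
    intro s
    rw [pvBSetLoop, dif_pos h, pvBDigits, dif_pos h, List.foldl_cons, ih]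
  | case2 n h =>
    intro s
    rw [pvBSetLoop, dif_neg h, pvBDigits, dif_neg h]; rfl

-- the splice loop computes: kept low part + p * value of the filtered high digits
theorem pvBSplice_eq (hi lo n p : Int) : 0 < p → 0 ≤ n →
    pvBSplice hi lo n p =
      PySem.Int.mod n p
        + p * pvVal ((pvBDigits (PySem.Int.floordiv n p)).filter
            (fun d => !decide (d = hi ∨ d = lo))) := by
  induction n, p using pvBSplice.induct hi lo with
  | case1 n p h d hd ih =>
    intro _ hn
    have hp := h.1
    have hpn := h.2
    have hq0 : (0:Int) ≤ PySem.Int.floordiv n (p * 10) :=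
      (PySem.Int.le_floordiv_iff_mul_le (by omega)).2 (by omega)
    have hr0 : (0:Int) ≤ PySem.Int.mod n p := PySem.Int.mod_nonneg _ (by omega)
    have hr1 : PySem.Int.mod n p < p := PySem.Int.mod_lt _ (by omega)
    have hnew : PySem.Int.floordiv (PySem.Int.floordiv n (p * 10) * p + PySem.Int.mod n p) p
        = PySem.Int.floordiv n (p * 10) :=
      (PySem.Int.floordiv_eq_iff_of_pos (by omega)).2 ⟨by omega, by nlinarith⟩
    have hdd : PySem.Int.floordiv (PySem.Int.floordiv n p) 10 = PySem.Int.floordiv n (p * 10) := by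
      rw [PySem.Int.floordiv_eq_ediv_of_pos (by omega : (0:Int) < p),
          PySem.Int.floordiv_eq_ediv_of_pos (by omega : (0:Int) < 10),
          PySem.Int.floordiv_eq_ediv_of_pos (by omega : (0:Int) < p * 10)]
      exact Int.ediv_ediv_of_nonneg (by omega)
    have hfpos : (0:Int) < PySem.Int.floordiv n p :=
      (PySem.Int.le_floordiv_iff_mul_le (by omega)).2 (by omega)
    have hmodnew : PySem.Int.mod (PySem.Int.floordiv n (p * 10) * p + PySem.Int.mod n p) p
        = PySem.Int.mod n p := by
      have := PySem.Int.floordiv_mul_add_mod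
        (PySem.Int.floordiv n (p * 10) * p + PySem.Int.mod n p) p
      rw [hnew] at this; omega
    have hcond : ¬ (!decide (PySem.Int.mod (PySem.Int.floordiv n p) 10 = hi
                ∨ PySem.Int.mod (PySem.Int.floordiv n p) 10 = lo)) = true := by
      have hd' : (PySem.Int.mod (PySem.Int.floordiv n p) 10 = hi
          ∨ PySem.Int.mod (PySem.Int.floordiv n p) 10 = lo) := hd
      rw [decide_eq_true hd']; simp
    rw [pvBSplice, dif_pos h, if_pos hd, ih h.1 (by nlinarith), hmodnew, hnew]
    conv_rhs => rw [pvBDigits, dif_pos hfpos]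
    rw [hdd, List.filter_cons, if_neg hcond]
  | case2 n p h d hd ih =>
    intro _ hn
    have hp := h.1
    have hpn := h.2
    have hfpos : (0:Int) < PySem.Int.floordiv n p :=
      (PySem.Int.le_floordiv_iff_mul_le (by omega)).2 (by omega)
    have hdd : PySem.Int.floordiv (PySem.Int.floordiv n p) 10 = PySem.Int.floordiv n (p * 10) := by
      rw [PySem.Int.floordiv_eq_ediv_of_pos (by omega : (0:Int) < p),
          PySem.Int.floordiv_eq_ediv_of_pos (by omega : (0:Int) < 10),
          PySem.Int.floordiv_eq_ediv_of_pos (by omega : (0:Int) < p * 10)]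
      exact Int.ediv_ediv_of_nonneg (by omega)
    have hd0 : 0 ≤ PySem.Int.mod (PySem.Int.floordiv n p) 10 :=
      PySem.Int.mod_nonneg _ (by omega)
    have hd9 : PySem.Int.mod (PySem.Int.floordiv n p) 10 < 10 :=
      PySem.Int.mod_lt _ (by omega)
    have hr0 : (0:Int) ≤ PySem.Int.mod n p := PySem.Int.mod_nonneg _ (by omega)
    have hr1 : PySem.Int.mod n p < p := PySem.Int.mod_lt _ (by omega)
    have hsplit : PySem.Int.floordiv n p = 10 * PySem.Int.floordiv n (p * 10)
        + PySem.Int.mod (PySem.Int.floordiv n p) 10 := by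
      have := PySem.Int.floordiv_mul_add_mod (PySem.Int.floordiv n p) 10
      rw [hdd] at this; omega
    have hmod10p : PySem.Int.mod n (p * 10)
        = PySem.Int.mod (PySem.Int.floordiv n p) 10 * p + PySem.Int.mod n p := by
      have h1 := PySem.Int.floordiv_mul_add_mod n p
      have h2 := PySem.Int.floordiv_mul_add_mod n (p * 10)
      nlinarith [h1, h2, hsplit]
    have hcond : (!decide (PySem.Int.mod (PySem.Int.floordiv n p) 10 = hi
                ∨ PySem.Int.mod (PySem.Int.floordiv n p) 10 = lo)) = true := by
      have hd' : ¬ (PySem.Int.mod (PySem.Int.floordiv n p) 10 = hi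
          ∨ PySem.Int.mod (PySem.Int.floordiv n p) 10 = lo) := hd
      rw [decide_eq_false hd']; rfl
    rw [pvBSplice, dif_pos h, if_neg hd, ih (by omega) hn, hmod10p]
    conv_rhs => rw [pvBDigits, dif_pos hfpos]
    rw [hdd, List.filter_cons, if_pos hcond, pvVal]
    ring
  | case3 n p h =>
    intro hp hn
    have hnp : n < p := by by_contra hc; exact h ⟨hp, by omega⟩
    have hf0 : PySem.Int.floordiv n p = 0 :=
      (PySem.Int.floordiv_eq_iff_of_pos (by omega)).2 ⟨by omega, by omega⟩
    have hm : PySem.Int.mod n p = n := by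
      have := PySem.Int.floordiv_mul_add_mod n p
      rw [hf0] at this; omega
    rw [pvBSplice, dif_neg h, hf0, hm]
    rw [pvBDigits, dif_neg (by omega : ¬ (0:Int) < 0)]
    simp [pvVal]

theorem eliminar_mayor_menor_alt_spec : Claim_equal_eliminar_mayor_menor_alt := by
  unfold Claim_equal_eliminar_mayor_menor_alt
  intro num _
  unfold Spec_eliminar_mayor_menor_alt eliminar_mayor_menor_alt eliminar_mayor_menor_alt_alt
  by_cases hnum : num ≤ 0
  · rw [if_pos hnum, pvALoop2_eq, pvBDigits, dif_neg (by omega)]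
    simp [pvVal]
  · rw [if_neg hnum, pvALoop1_eq, pvALoop2_eq,
        pvBSplice_eq _ _ _ _ (by omega) (by omega),
        (by simp [pysem] : PySem.Int.mod num 1 = 0),
        (by simp [pysem] : PySem.Int.floordiv num 1 = num)]
    replace hnum : 0 < num := by omega
    cases hd : pvBDigits num with
    | nil =>
      exfalso
      rw [pvBDigits, dif_pos hnum] at hd
      exact List.cons_ne_nil _ _ hd
    | cons x t =>
      have hbx : 0 ≤ x ∧ x < 10 := pvBDigits_bounds num x (by rw [hd]; exact List.mem_cons_self ..)
      have hset : pvBSetLoop num PySem.Set.empty = PySem.Set.ofList (x :: t) := by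
        rw [pvBSetLoop_eq, hd, PySem.Set.ofList_eq_foldl]; rfl
      have hmem : ∀ z, z ∈ pvBSetLoop num PySem.Set.empty ↔ z ∈ (x :: t) := by
        intro z; rw [hset]; exact PySem.Set.mem_ofList ..
      -- A's running extrema are foldl max / foldl min from the first digit
      have hmax : (x :: t).foldl (fun m d => if d > m then d else m) (-1) = t.foldl max x := by
        simp only [pvIfMax, List.foldl_cons]
        congr 1; omega
      have hmin : (x :: t).foldl (fun m d => if d < m then d else m) 10 = t.foldl min x := by
        simp only [pvIfMin, List.foldl_cons]
        congr 1; omega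
      -- B's max(present) equals the same value
      have hMbound := PySem.List.le_foldl_max t x
      have hMmem : t.foldl max x ∈ (x :: t) := by
        rcases PySem.List.foldl_max_mem t x with he | hm
        · rw [he]; exact List.mem_cons_self ..
        · exact List.mem_cons_of_mem _ hm
      have hhi : (PySem.List.max? (pvBSetLoop num PySem.Set.empty) (fun x => x)).getD 0
          = t.foldl max x := by
        cases hmx : PySem.List.max? (pvBSetLoop num PySem.Set.empty) (fun x => x) with
        | none =>
          exfalso
          have := (PySem.List.max?_eq_none_iff _ _).1 hmx
          have hx : x ∈ pvBSetLoop num PySem.Set.empty := (hmem x).2 (List.mem_cons_self ..)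
          rw [this] at hx; simp at hx
        | some m =>
          have hm1 : m ∈ (x :: t) := (hmem m).1 (PySem.List.max?_mem hmx)
          have hm2 : ∀ y ∈ (x :: t), y ≤ m := by
            intro y hy
            exact PySem.List.max?_isMax hmx y ((hmem y).2 hy)
          simp only [Option.getD_some]
          apply le_antisymm
          · rcases List.mem_cons.1 hm1 with rfl | hmm
            · exact hMbound.1
            · exact hMbound.2 _ hmm
          · exact hm2 _ hMmem
      have hmbound := PySem.List.foldl_min_le t x
      have hmmem : t.foldl min x ∈ (x :: t) := by
        rcases PySem.List.foldl_min_mem t x with he | hm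
        · rw [he]; exact List.mem_cons_self ..
        · exact List.mem_cons_of_mem _ hm
      have hlo : (PySem.List.min? (pvBSetLoop num PySem.Set.empty) (fun x => x)).getD 0
          = t.foldl min x := by
        cases hmx : PySem.List.min? (pvBSetLoop num PySem.Set.empty) (fun x => x) with
        | none =>
          exfalso
          have := (PySem.List.min?_eq_none_iff _ _).1 hmx
          have hx : x ∈ pvBSetLoop num PySem.Set.empty := (hmem x).2 (List.mem_cons_self ..)
          rw [this] at hx; simp at hx
        | some m =>
          have hm1 : m ∈ (x :: t) := (hmem m).1 (PySem.List.min?_mem hmx)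
          have hm2 : ∀ y ∈ (x :: t), m ≤ y := by
            intro y hy
            exact PySem.List.min?_isMin hmx y ((hmem y).2 hy)
          simp only [Option.getD_some]
          apply le_antisymm
          · exact hm2 _ hmmem
          · rcases List.mem_cons.1 hm1 with rfl | hmm
            · exact hmbound.1
            · exact hmbound.2 _ hmm
      simp only [hmax, hmin, hhi, hlo]
      rw [List.filter_congr (fun d _ => by
        show decide (d ≠ t.foldl max x ∧ d ≠ t.foldl min x)
            = !decide (d = t.foldl max x ∨ d = t.foldl min x)
        by_cases h1 : d = t.foldl max x <;> by_cases h2 : d = t.foldl min x <;>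
          simp [h1, h2])]

-- ===== VERDICT (by name: the statement is the Claim_ definition above) =====
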